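-- pv_equiv track=rewrite | github.com/FrancescoRomeo02/UniversityNotes | LT_21-22/SEM2/ASD/Exercises/D&I/count_TT.py | count_TT
-- ===== SOURCE A (Python) =====
-- def count_TT(a, left, right):
--     if(left >= right):
--         return 0
--     else:
--         m = (left+right)//2
--         count_l = count_TT(a, left, m)
--         count_r = count_TT(a, m+1, right)
--         count_t = count_l+count_r
--         if(a[m] and a[m+1]):
--             count_t+=1
--         return count_t
-- ===== SOURCE B (Python) =====
-- def count_TT(a, left, right):
--     count = 0
--     for i in range(left, right):
--         if a[i] and a[i+1]:
--             count += 1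
--     return count
-- ===== Notes on version B (the rewrite author's own statement) =====
-- stated objective: simpler
-- what changed: Replaces the recursive divide-and-conquer (split at midpoint, count pair at the split, recurse on both halves) with a single forward loop over range(left, right) counting indices i where a[i] and a[i+1] are both true.
import Mathlib
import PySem

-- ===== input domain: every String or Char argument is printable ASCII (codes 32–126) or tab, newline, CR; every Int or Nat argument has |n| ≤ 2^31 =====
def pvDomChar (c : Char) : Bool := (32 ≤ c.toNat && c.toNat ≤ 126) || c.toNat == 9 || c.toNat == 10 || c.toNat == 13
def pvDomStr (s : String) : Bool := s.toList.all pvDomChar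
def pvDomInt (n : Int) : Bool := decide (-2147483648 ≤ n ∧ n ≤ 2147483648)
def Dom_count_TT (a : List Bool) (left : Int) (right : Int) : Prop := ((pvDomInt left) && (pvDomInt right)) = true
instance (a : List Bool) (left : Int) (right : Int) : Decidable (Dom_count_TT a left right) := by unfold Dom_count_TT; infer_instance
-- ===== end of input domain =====

-- B replaces A's recursive divide-and-conquer with one linear scan; objective: simpler.

-- midpoint bounds, used by the port's termination proof
theorem countTT_mid_lt (left right : Int) (h : left < right) :
    left ≤ PySem.Int.floordiv (left + right) 2 ∧ PySem.Int.floordiv (left + right) 2 < right := by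
  have h1 := PySem.Int.floordiv_two_mid_bounds (lo := left) (hi := right) (by omega)
  have h2 : PySem.Int.floordiv (left + right) 2 < right := by
    rw [PySem.Int.floordiv_lt_iff_lt_mul (by omega : (0:Int) < 2)]
    omega
  exact ⟨h1.1, h2⟩

-- ===== PORT A =====
def count_TT (a : List Bool) (left : Int) (right : Int) : Int :=
  if left ≥ right then 0
  else
    let m := PySem.Int.floordiv (left + right) 2
    let count_l := count_TT a left m
    let count_r := count_TT a (m + 1) right
    let count_t := count_l + count_r
    -- `a[m] and a[m+1]`; Pre_ guarantees every evaluated access is in range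
    if PySem.List.pyGetD a m false && PySem.List.pyGetD a (m + 1) false then count_t + 1
    else count_t
termination_by (right - left).toNat
decreasing_by
  · have := countTT_mid_lt left right (by omega)
    omega
  · have := countTT_mid_lt left right (by omega)
    omega

-- ===== PORT B =====
def count_TT_alt (a : List Bool) (left : Int) (right : Int) : Int :=
  (PySem.List.pyRange left right 1).foldl
    (fun count i =>
      if PySem.List.pyGetD a i false && PySem.List.pyGetD a (i + 1) false then count + 1
      else count) 0

-- ===== PRECONDITION & SPEC =====
-- Pre_ holds exactly where Python A returns: outside it some evaluated access a[i]
-- (or a[i+1], reached only when a[i] is true) raises IndexError — both A and B raise there.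
def Pre_count_TT (a : List Bool) (left : Int) (right : Int) : Prop :=
  right ≤ left ∨
    (-(a.length : Int) ≤ left ∧
      (right < a.length ∨ (right = a.length ∧ a.getLast?.getD false = false)))
instance (a : List Bool) (left : Int) (right : Int) : Decidable (Pre_count_TT a left right) := by
  unfold Pre_count_TT; infer_instance

def pvWitness_count_TT : List Bool × Int × Int := ([true, true, false], 0, 2)

def Spec_count_TT (a : List Bool) (left : Int) (right : Int) (out : Int) : Prop := out = count_TT_alt a left right
instance (a : List Bool) (left : Int) (right : Int) (out : Int) : Decidable (Spec_count_TT a left right out) := by unfold Spec_count_TT; infer_instance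

-- ===== CLAIM (what is proved, stated in full; the proofs are below) =====
def Claim_equal_count_TT : Prop := ∀ (a : List Bool) (left : Int) (right : Int), Dom_count_TT a left right → Pre_count_TT a left right → Spec_count_TT a left right (count_TT a left right)

-- ===== LEMMAS AND PROOFS =====

-- the pair indicator at index i
def countTT_g (a : List Bool) (i : Int) : Int :=
  if PySem.List.pyGetD a i false && PySem.List.pyGetD a (i + 1) false then 1 else 0

theorem countTT_alt_foldl (a : List Bool) (l : List Int) (c : Int) :
    l.foldl (fun count i =>
      if PySem.List.pyGetD a i false && PySem.List.pyGetD a (i + 1) false then count + 1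
      else count) c = c + (l.map (countTT_g a)).sum := by
  induction l generalizing c with
  | nil => simp
  | cons x xs ih =>
    simp only [List.foldl_cons, List.map_cons, List.sum_cons, ih, countTT_g]
    split <;> ring

theorem countTT_eq_sum (a : List Bool) :
    ∀ (n : ℕ) (left right : Int), (right - left).toNat = n →
      count_TT a left right = ((PySem.List.pyRange left right 1).map (countTT_g a)).sum := by
  intro n
  induction n using Nat.strong_induction_on with
  | _ n ih =>
    intro left right hn
    rw [count_TT]
    by_cases hlr : left ≥ right
    · simp [hlr, PySem.List.pyRange_one_eq_nil (by omega : right ≤ left)]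
    · have hm := countTT_mid_lt left right (by omega)
      set m := PySem.Int.floordiv (left + right) 2 with hmdef
      have hsplit : PySem.List.pyRange left right 1 =
          PySem.List.pyRange left m 1 ++ PySem.List.pyRange m right 1 :=
        PySem.List.pyRange_one_append left m right hm.1 (by omega)
      have hcons : PySem.List.pyRange m right 1 = m :: PySem.List.pyRange (m + 1) right 1 :=
        PySem.List.pyRange_one_cons hm.2
      have ihl := ih (m - left).toNat (by omega) left m rfl
      have ihr := ih (right - (m + 1)).toNat (by omega) (m + 1) right rfl
      simp only [hlr, if_false, ihl, ihr, hsplit, hcons,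
        List.map_append, List.sum_append, List.map_cons, List.sum_cons, countTT_g]
      split <;> ring

-- ===== VERDICT (by name: the statement is the Claim_ definition above) =====
theorem count_TT_spec : Claim_equal_count_TT := by
  intro a left right _ _
  unfold Spec_count_TT count_TT_alt
  rw [countTT_alt_foldl, countTT_eq_sum a (right - left).toNat left right rfl]
  ring
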